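-- pv_equiv track=rewrite | github.com/AxsolLars/ArcticGate | configs/generate_config.py | generate
-- ===== SOURCE A (Python) =====
-- def generate(
--     n: int = 100,
--     publisher_name: str = "PLC0",
--     publisher_id: int = 10000,
--     wg_id_start: int = 103,
--     writer_id_start: int = 108,
--     interval_start_ms: int = 500,
--     interval_step_ms: int = 5,
--     fields_per_dataset: int = 10,
--     wg_name_prefix: str = "Processors / CPU - WG",
--     dataset_name_prefix: str = "core_",
--     field_type: str = "Float",
-- ) -> str:
--     lines: list[str] = []
--     lines.append("[[publishers]]")
--     lines.append(f'name = "{publisher_name}"')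
--     lines.append(f"publisherId = {publisher_id}")
--     lines.append("")
--
--     for idx in range(n):
--         wg_id = wg_id_start + idx
--         interval = interval_start_ms + idx * interval_step_ms
--         writer_id = writer_id_start + idx
--
--         wg_name = f"{wg_name_prefix}{wg_id}"
--         ds_name = f"{dataset_name_prefix}{writer_id}"
--
--         lines.append("[[publishers.writerGroups]]")
--         lines.append(f"id = {wg_id}")
--         lines.append(f"interval = {interval}")
--         lines.append(f'name = "{wg_name}"')
--         lines.append("")
--         lines.append("[[publishers.writerGroups.dataSets]]")
--         lines.append(f"writerId = {writer_id}")
--         lines.append(f'name = "{ds_name}"')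
--         lines.append("fields = [")
--
--         for f in range(1, fields_per_dataset + 1):
--             field_name = f"{ds_name}_{f}"
--             lines.append(f'  {{ name = "{field_name}", type = "{field_type}" }},')
--
--         lines.append("]")
--         lines.append("")
--
--     return "\n".join(lines).rstrip() + "\n"
-- ===== SOURCE B (Python) =====
-- def generate(
--     n: int = 100,
--     publisher_name: str = "PLC0",
--     publisher_id: int = 10000,
--     wg_id_start: int = 103,
--     writer_id_start: int = 108,
--     interval_start_ms: int = 500,
--     interval_step_ms: int = 5,
--     fields_per_dataset: int = 10,
--     wg_name_prefix: str = "Processors / CPU - WG",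
--     dataset_name_prefix: str = "core_",
--     field_type: str = "Float",
-- ) -> str:
--     header = (
--         '[[publishers]]\nname = "'
--         + publisher_name
--         + '"\npublisherId = '
--         + str(publisher_id)
--         + "\n\n"
--     )
--     chunks = [header]
--     if n > 0:
--         # Stage 1: compile the writer-group block into a template once:
--         # literal segments `texts` interleaved with slot indices `slots`
--         # (0 = wg_id, 1 = interval, 2 = writer_id, 3 = ds_name).  The
--         # per-field loop runs only here, at compile time.
--         texts = ["[[publishers.writerGroups]]\nid = "]
--         slots = []
--
--         def add(slot, lit):
--             slots.append(slot)
--             texts.append(lit)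
--
--         add(0, "\ninterval = ")
--         add(1, '\nname = "' + wg_name_prefix)
--         add(0, '"\n\n[[publishers.writerGroups.dataSets]]\nwriterId = ')
--         add(2, '\nname = "')
--         add(3, '"\nfields = [\n')
--         for f in range(1, fields_per_dataset + 1):
--             texts[-1] += '  { name = "'
--             add(3, f'_{f}", type = "{field_type}" }},\n')
--         texts[-1] += "]\n\n"
--
--         # Stage 2: instantiate the compiled template once per group.
--         for idx in range(n):
--             writer_id = writer_id_start + idx
--             vals = (
--                 str(wg_id_start + idx),
--                 str(interval_start_ms + idx * interval_step_ms),
--                 str(writer_id),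
--                 dataset_name_prefix + str(writer_id),
--             )
--             chunks.append(texts[0])
--             for slot, lit in zip(slots, texts[1:]):
--                 chunks.append(vals[slot])
--                 chunks.append(lit)
--     return "".join(chunks).rstrip() + "\n"
-- ===== Notes on version B (the rewrite author's own statement) =====
-- stated objective: alternative
-- what changed: B compiles the writer-group block once into a template (a list of literal segments interleaved with slot indices, so the per-field loop runs only once, at compile time) and then instantiates that template n times with the per-group values, instead of A's single pass that re-emits every line of every block.
import Mathlib
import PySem

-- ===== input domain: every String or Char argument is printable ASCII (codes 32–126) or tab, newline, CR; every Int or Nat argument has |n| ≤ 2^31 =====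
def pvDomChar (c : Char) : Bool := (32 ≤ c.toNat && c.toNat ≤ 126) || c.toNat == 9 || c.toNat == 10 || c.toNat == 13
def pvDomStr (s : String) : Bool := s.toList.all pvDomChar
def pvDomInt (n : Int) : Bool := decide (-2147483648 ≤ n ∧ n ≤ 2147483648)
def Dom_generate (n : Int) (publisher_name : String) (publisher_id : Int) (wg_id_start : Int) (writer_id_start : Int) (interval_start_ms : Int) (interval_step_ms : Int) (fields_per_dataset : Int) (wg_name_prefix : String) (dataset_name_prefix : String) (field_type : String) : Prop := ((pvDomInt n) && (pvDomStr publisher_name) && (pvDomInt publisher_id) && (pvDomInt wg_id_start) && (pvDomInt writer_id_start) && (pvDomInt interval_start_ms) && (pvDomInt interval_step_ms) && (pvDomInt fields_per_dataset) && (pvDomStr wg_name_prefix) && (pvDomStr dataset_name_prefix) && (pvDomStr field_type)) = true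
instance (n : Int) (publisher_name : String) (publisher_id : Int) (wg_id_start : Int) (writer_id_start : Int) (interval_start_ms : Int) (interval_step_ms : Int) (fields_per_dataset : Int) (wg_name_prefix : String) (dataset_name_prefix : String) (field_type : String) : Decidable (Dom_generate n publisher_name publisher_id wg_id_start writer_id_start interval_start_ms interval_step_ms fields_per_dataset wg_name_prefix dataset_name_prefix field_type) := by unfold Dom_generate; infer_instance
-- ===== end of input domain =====

-- B compiles the writer-group block once into a template (literal segments interleaved with
-- slot indices; the per-field loop runs only at compile time) and instantiates that template
-- n times, instead of A's pass that re-emits every line of every block; objective: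
-- alternative algorithm, same cost.

-- ===== PORT A =====
def generate (n : Int) (publisher_name : String) (publisher_id : Int) (wg_id_start : Int) (writer_id_start : Int) (interval_start_ms : Int) (interval_step_ms : Int) (fields_per_dataset : Int) (wg_name_prefix : String) (dataset_name_prefix : String) (field_type : String) : String :=
  let lines : List String := []
  let lines := lines ++ ["[[publishers]]"]
  let lines := lines ++ ["name = \"" ++ publisher_name ++ "\""]
  let lines := lines ++ ["publisherId = " ++ PySem.Int.toStr publisher_id]
  let lines := lines ++ [""]
  let lines := (PySem.List.pyRange 0 n 1).foldl (fun lines idx =>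
    let wg_id := wg_id_start + idx
    let interval := interval_start_ms + idx * interval_step_ms
    let writer_id := writer_id_start + idx
    let wg_name := wg_name_prefix ++ PySem.Int.toStr wg_id
    let ds_name := dataset_name_prefix ++ PySem.Int.toStr writer_id
    let lines := lines ++ ["[[publishers.writerGroups]]"]
    let lines := lines ++ ["id = " ++ PySem.Int.toStr wg_id]
    let lines := lines ++ ["interval = " ++ PySem.Int.toStr interval]
    let lines := lines ++ ["name = \"" ++ wg_name ++ "\""]
    let lines := lines ++ [""]
    let lines := lines ++ ["[[publishers.writerGroups.dataSets]]"]
    let lines := lines ++ ["writerId = " ++ PySem.Int.toStr writer_id]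
    let lines := lines ++ ["name = \"" ++ ds_name ++ "\""]
    let lines := lines ++ ["fields = ["]
    let lines := (PySem.List.pyRange 1 (fields_per_dataset + 1) 1).foldl (fun lines f =>
      lines ++ ["  { name = \"" ++ ds_name ++ "_" ++ PySem.Int.toStr f ++ "\", type = \"" ++ field_type ++ "\" },"]) lines
    let lines := lines ++ ["]"]
    lines ++ [""]) lines
  PySem.Str.rstrip (PySem.Str.join "\n" lines) ++ "\n"

-- ===== PORT B =====
-- helper for Python's `texts[-1] += s` on a list of strings
def pvLastAdd (ts : List String) (u : String) : List String :=
  ts.dropLast ++ [(ts.getLast?.getD "") ++ u]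

def generate_alt (n : Int) (publisher_name : String) (publisher_id : Int) (wg_id_start : Int) (writer_id_start : Int) (interval_start_ms : Int) (interval_step_ms : Int) (fields_per_dataset : Int) (wg_name_prefix : String) (dataset_name_prefix : String) (field_type : String) : String :=
  let header := "[[publishers]]\nname = \"" ++ publisher_name ++ "\"\npublisherId = " ++ PySem.Int.toStr publisher_id ++ "\n\n"
  let chunks : List String := [header]
  let chunks :=
    if 0 < n then
      -- stage 1: compile the group template (slots: 0 = wg_id, 1 = interval, 2 = writer_id, 3 = ds_name)
      let texts : List String := ["[[publishers.writerGroups]]\nid = "]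
      let slots : List Int := []
      let slots := slots ++ [0]
      let texts := texts ++ ["\ninterval = "]
      let slots := slots ++ [1]
      let texts := texts ++ ["\nname = \"" ++ wg_name_prefix]
      let slots := slots ++ [0]
      let texts := texts ++ ["\"\n\n[[publishers.writerGroups.dataSets]]\nwriterId = "]
      let slots := slots ++ [2]
      let texts := texts ++ ["\nname = \""]
      let slots := slots ++ [3]
      let texts := texts ++ ["\"\nfields = [\n"]
      let st := (PySem.List.pyRange 1 (fields_per_dataset + 1) 1).foldl (fun (st : List Int × List String) f =>
          (st.1 ++ [3],
           pvLastAdd st.2 "  { name = \"" ++ ["_" ++ PySem.Int.toStr f ++ "\", type = \"" ++ field_type ++ "\" },\n"]))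
        (slots, texts)
      let slots := st.1
      let texts := pvLastAdd st.2 "]\n\n"
      -- stage 2: instantiate the template once per group
      (PySem.List.pyRange 0 n 1).foldl (fun chunks idx =>
          let writer_id := writer_id_start + idx
          let vals : Int → String := fun s =>
            if s = 0 then PySem.Int.toStr (wg_id_start + idx)
            else if s = 1 then PySem.Int.toStr (interval_start_ms + idx * interval_step_ms)
            else if s = 2 then PySem.Int.toStr writer_id
            else dataset_name_prefix ++ PySem.Int.toStr (writer_id_start + idx)
          let chunks := chunks ++ [texts.headD ""]
          (List.zip slots texts.tail).foldl (fun chunks p => chunks ++ [vals p.1, p.2]) chunks)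
        chunks
    else chunks
  PySem.Str.rstrip (PySem.Str.join "" chunks) ++ "\n"

-- ===== PRECONDITION & SPEC =====
def Spec_generate (n : Int) (publisher_name : String) (publisher_id : Int) (wg_id_start : Int) (writer_id_start : Int) (interval_start_ms : Int) (interval_step_ms : Int) (fields_per_dataset : Int) (wg_name_prefix : String) (dataset_name_prefix : String) (field_type : String) (out : String) : Prop := out = generate_alt n publisher_name publisher_id wg_id_start writer_id_start interval_start_ms interval_step_ms fields_per_dataset wg_name_prefix dataset_name_prefix field_type
instance (n : Int) (publisher_name : String) (publisher_id : Int) (wg_id_start : Int) (writer_id_start : Int) (interval_start_ms : Int) (interval_step_ms : Int) (fields_per_dataset : Int) (wg_name_prefix : String) (dataset_name_prefix : String) (field_type : String) (out : String) : Decidable (Spec_generate n publisher_name publisher_id wg_id_start writer_id_start interval_start_ms interval_step_ms fields_per_dataset wg_name_prefix dataset_name_prefix field_type out) := by unfold Spec_generate; infer_instance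

-- ===== CLAIM (what is proved, stated in full; the proofs are below) =====
def Claim_equal_generate : Prop := ∀ (n : Int) (publisher_name : String) (publisher_id : Int) (wg_id_start : Int) (writer_id_start : Int) (interval_start_ms : Int) (interval_step_ms : Int) (fields_per_dataset : Int) (wg_name_prefix : String) (dataset_name_prefix : String) (field_type : String), Dom_generate n publisher_name publisher_id wg_id_start writer_id_start interval_start_ms interval_step_ms fields_per_dataset wg_name_prefix dataset_name_prefix field_type → Spec_generate n publisher_name publisher_id wg_id_start writer_id_start interval_start_ms interval_step_ms fields_per_dataset wg_name_prefix dataset_name_prefix field_type (generate n publisher_name publisher_id wg_id_start writer_id_start interval_start_ms interval_step_ms fields_per_dataset wg_name_prefix dataset_name_prefix field_type)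

-- ===== LEMMAS AND PROOFS =====

theorem rstrip_append_nl (l : List Char) :
    PySem.Chars.rstrip (l ++ ['\n']) = PySem.Chars.rstrip l := by
  have h : PySem.Chars.isspace '\n' = true := by decide
  simp [PySem.Chars.rstrip, h]

theorem intercalate_nl (ps : List (List Char)) (h : ps ≠ []) :
    List.intercalate ['\n'] ps ++ ['\n'] = (ps.map (· ++ ['\n'])).flatten := by
  induction ps with
  | nil => simp at h
  | cons x t ih =>
    cases t with
    | nil => simp [List.intercalate]
    | cons y t' =>
      have h2 := ih (by simp)
      simp only [List.intercalate, List.intersperse, List.flatten, List.map] at h2 ⊢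
      simp only [List.append_eq, List.append_assoc] at h2 ⊢
      rw [h2]

theorem inter_nil (ps : List (List Char)) : List.intercalate ([] : List Char) ps = ps.flatten := by
  induction ps with
  | nil => simp [List.intercalate]
  | cons x t ih =>
    cases t with
    | nil => simp [List.intercalate]
    | cons y t' =>
      simp only [List.intercalate, List.intersperse, List.flatten] at ih ⊢
      simp only [List.append_eq, List.nil_append] at ih ⊢
      rw [ih]

theorem hstep (x y : String) (h : y.toList = x.toList ++ ['\n']) :
    PySem.Str.rstrip x ++ "\n" = PySem.Str.rstrip y ++ "\n" := by
  unfold PySem.Str.rstrip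
  rw [h, rstrip_append_nl]

-- rendering of a compiled template state, at the List Char level
def rnd (v : Int → String) (ss : List Int) (ts : List String) : List Char :=
  (ts.headD "").toList ++ ((List.zip ss ts.tail).map (fun p => (v p.1).toList ++ p.2.toList)).flatten

theorem pvLastAdd_length (ts : List String) (u : String) (h : ts ≠ []) :
    (pvLastAdd ts u).length = ts.length := by
  unfold pvLastAdd
  cases ts with
  | nil => simp at h
  | cons a t => simp

theorem rnd_snoc (v : Int → String) (ss : List Int) (ts : List String) (s : Int) (t : String)
    (hlen : ss.length + 1 = ts.length) :
    rnd v (ss ++ [s]) (ts ++ [t]) = rnd v ss ts ++ (v s).toList ++ t.toList := by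
  cases ts with
  | nil => simp at hlen
  | cons t0 rest =>
    unfold rnd
    simp only [List.cons_append, List.headD_cons, List.tail_cons]
    rw [List.zip_append (by simpa using hlen)]
    simp [List.append_assoc]

theorem zip_lastAdd (v : Int → String) (u : String) :
    ∀ (ss : List Int) (ts : List String), ss.length = ts.length → ts ≠ [] →
    ((List.zip ss (pvLastAdd ts u)).map (fun p => (v p.1).toList ++ p.2.toList)).flatten
      = ((List.zip ss ts).map (fun p => (v p.1).toList ++ p.2.toList)).flatten ++ u.toList := by
  intro ss
  induction ss with
  | nil => intro ts h hne; cases ts with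
    | nil => simp at hne
    | cons a t => simp at h
  | cons s ss' ih =>
    intro ts h hne
    cases ts with
    | nil => simp at h
    | cons t rest =>
      cases rest with
      | nil =>
        cases ss' with
        | nil => simp [pvLastAdd, String.toList_append, List.append_assoc]
        | cons a b => simp at h
      | cons r rest' =>
        have h' : ss'.length = (r :: rest').length := by simpa using h
        have : pvLastAdd (t :: r :: rest') u = t :: pvLastAdd (r :: rest') u := by
          simp [pvLastAdd]
        rw [this]
        simp only [List.zip_cons_cons, List.map_cons, List.flatten_cons]
        rw [ih (r :: rest') h' (by simp)]
        simp [List.append_assoc]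

theorem rnd_lastAdd (v : Int → String) (ss : List Int) (ts : List String) (u : String)
    (hlen : ss.length + 1 = ts.length) :
    rnd v ss (pvLastAdd ts u) = rnd v ss ts ++ u.toList := by
  cases ts with
  | nil => simp at hlen
  | cons t0 rest =>
    cases rest with
    | nil =>
      have : ss = [] := by cases ss with
        | nil => rfl
        | cons a b => simp at hlen
      subst this
      simp [rnd, pvLastAdd, String.toList_append]
    | cons r rest' =>
      have hss : ss.length = (r :: rest').length := by simpa using hlen
      have : pvLastAdd (t0 :: r :: rest') u = t0 :: pvLastAdd (r :: rest') u := by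
        simp [pvLastAdd]
      rw [rnd, this]
      simp only [List.headD_cons, List.tail_cons]
      rw [zip_lastAdd v u ss (r :: rest') hss (by simp)]
      simp [rnd, List.append_assoc]

-- the compile step of B's template fold
def cstep (field_type : String) (st : List Int × List String) (f : Int) : List Int × List String :=
  (st.1 ++ [3],
   pvLastAdd st.2 "  { name = \"" ++ ["_" ++ PySem.Int.toStr f ++ "\", type = \"" ++ field_type ++ "\" },\n"])

theorem cstep_len (field_type : String) :
    ∀ (fs : List Int) (ss : List Int) (ts : List String), ss.length + 1 = ts.length →
      ((fs.foldl (cstep field_type) (ss, ts)).1.length + 1 = (fs.foldl (cstep field_type) (ss, ts)).2.length) := by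
  intro fs
  induction fs with
  | nil => intro ss ts h; simpa using h
  | cons f fs' ih =>
    intro ss ts h
    have hne : ts ≠ [] := by cases ts with
      | nil => simp at h
      | cons a b => simp
    simp only [List.foldl_cons]
    apply ih
    simp [pvLastAdd_length _ _ hne, ← h]

theorem rnd_fold (field_type : String) (v : Int → String) :
    ∀ (fs : List Int) (ss : List Int) (ts : List String), ss.length + 1 = ts.length →
    rnd v (fs.foldl (cstep field_type) (ss, ts)).1 (fs.foldl (cstep field_type) (ss, ts)).2
      = rnd v ss ts ++ (fs.map (fun f =>
          ("  { name = \"" : String).toList ++ (v 3).toList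
            ++ ("_" ++ PySem.Int.toStr f ++ "\", type = \"" ++ field_type ++ "\" },\n" : String).toList)).flatten := by
  intro fs
  induction fs with
  | nil => intro ss ts h; simp
  | cons f fs' ih =>
    intro ss ts h
    have hne : ts ≠ [] := by cases ts with
      | nil => simp at h
      | cons a b => simp
    have hlen2 : ss.length + 1 = (pvLastAdd ts "  { name = \"").length := by
      rw [pvLastAdd_length _ _ hne]; exact h
    have hc : cstep field_type (ss, ts) f = (ss ++ [3],
        pvLastAdd ts "  { name = \"" ++ ["_" ++ PySem.Int.toStr f ++ "\", type = \"" ++ field_type ++ "\" },\n"]) := rfl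
    simp only [List.foldl_cons, hc]
    rw [ih (ss ++ [3]) _ (by simp [pvLastAdd_length _ _ hne]; omega)]
    rw [rnd_snoc v ss _ 3 _ hlen2, rnd_lastAdd v ss ts _ h]
    simp [List.append_assoc]

theorem flat_rnd (v : Int → String) (ss : List Int) (ts : List String) :
    List.flatMap String.toList
      (ts.head?.getD "" :: List.flatMap (fun p => [v p.1, p.2]) (ss.zip ts.tail)) = rnd v ss ts := by
  have h : ∀ (l : List (Int × String)),
      List.flatMap String.toList (List.flatMap (fun p => [v p.1, p.2]) l)
        = (l.map (fun p => (v p.1).toList ++ p.2.toList)).flatten := by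
    intro l
    induction l with
    | nil => simp
    | cons p t ih => simp [ih]
  simp only [List.flatMap_cons, rnd, List.headD_eq_head?_getD]
  rw [h (ss.zip ts.tail)]

theorem main_thm (n : Int) (publisher_name : String) (publisher_id : Int) (wg_id_start : Int) (writer_id_start : Int) (interval_start_ms : Int) (interval_step_ms : Int) (fields_per_dataset : Int) (wg_name_prefix : String) (dataset_name_prefix : String) (field_type : String) :
    generate n publisher_name publisher_id wg_id_start writer_id_start interval_start_ms interval_step_ms fields_per_dataset wg_name_prefix dataset_name_prefix field_type
    = generate_alt n publisher_name publisher_id wg_id_start writer_id_start interval_start_ms interval_step_ms fields_per_dataset wg_name_prefix dataset_name_prefix field_type := by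
  unfold generate generate_alt
  by_cases hn : 0 < n
  case neg =>
    have hr : PySem.List.pyRange 0 n 1 = [] := by
      rw [PySem.List.pyRange_one]
      simp only [List.map_eq_nil_iff, List.range_eq_nil, Int.toNat_eq_zero]
      omega
    simp only [if_neg hn, hr, List.foldl_nil]
    apply hstep
    simp only [PySem.Str.toList_join, PySem.Chars.join]
    rw [show ("\n" : String).toList = ['\n'] by simp]
    rw [intercalate_nl _ (by simp)]
    simp [inter_nil, String.toList_append, List.append_assoc]
  have hc : (fun (st : List Int × List String) (f : Int) =>
      (st.1 ++ [3], pvLastAdd st.2 "  { name = \"" ++ ["_" ++ PySem.Int.toStr f ++ "\", type = \"" ++ field_type ++ "\" },\n"]))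
      = cstep field_type := rfl
  simp only [if_pos hn, hc, PySem.List.foldl_append_singleton_eq_map, PySem.List.foldl_append_eq_flatMap,
    List.nil_append, List.append_assoc]
  apply hstep
  simp only [PySem.Str.toList_join, PySem.Chars.join]
  rw [show ("\n" : String).toList = ['\n'] by simp]
  rw [intercalate_nl _ (by simp)]
  simp [List.map_map, List.append_assoc, String.toList_append]
  simp only [inter_nil, ← List.flatMap_def, List.flatMap_assoc]
  simp only [List.flatten_cons, ← List.flatMap_def, List.flatMap_assoc, List.cons_append,
    List.append_assoc, List.nil_append]
  simp only [List.cons.injEq, true_and, List.append_right_inj]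
  refine congrArg (fun F => List.flatMap F (PySem.List.pyRange 0 n)) (funext fun idx => ?_)
  have h0 : ([0, 1, 0, 2, 3] : List Int).length + 1 = (["[[publishers.writerGroups]]\nid = ", "\ninterval = ", "\nname = \"" ++ wg_name_prefix, "\"\n\n[[publishers.writerGroups.dataSets]]\nwriterId = ", "\nname = \"", "\"\nfields = [\n"]).length := by simp
  have hst := cstep_len field_type (PySem.List.pyRange 1 (fields_per_dataset + 1)) [0, 1, 0, 2, 3] ["[[publishers.writerGroups]]\nid = ", "\ninterval = ", "\nname = \"" ++ wg_name_prefix, "\"\n\n[[publishers.writerGroups.dataSets]]\nwriterId = ", "\nname = \"", "\"\nfields = [\n"] h0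
  have hfold := rnd_fold field_type (fun s : Int =>
      if s = 0 then PySem.Int.toStr (wg_id_start + idx)
      else if s = 1 then PySem.Int.toStr (interval_start_ms + idx * interval_step_ms)
      else if s = 2 then PySem.Int.toStr (writer_id_start + idx)
      else dataset_name_prefix ++ PySem.Int.toStr (writer_id_start + idx))
    (PySem.List.pyRange 1 (fields_per_dataset + 1)) [0, 1, 0, 2, 3] ["[[publishers.writerGroups]]\nid = ", "\ninterval = ", "\nname = \"" ++ wg_name_prefix, "\"\n\n[[publishers.writerGroups.dataSets]]\nwriterId = ", "\nname = \"", "\"\nfields = [\n"] h0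
  rw [flat_rnd (fun s : Int =>
      if s = 0 then PySem.Int.toStr (wg_id_start + idx)
      else if s = 1 then PySem.Int.toStr (interval_start_ms + idx * interval_step_ms)
      else if s = 2 then PySem.Int.toStr (writer_id_start + idx)
      else dataset_name_prefix ++ PySem.Int.toStr (writer_id_start + idx))]
  rw [rnd_lastAdd _ _ _ _ hst, hfold]
  have hFG : (fun f : Int => ("  { name = \"" : String).toList
        ++ ((fun s : Int =>
              if s = 0 then PySem.Int.toStr (wg_id_start + idx)
              else if s = 1 then PySem.Int.toStr (interval_start_ms + idx * interval_step_ms)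
              else if s = 2 then PySem.Int.toStr (writer_id_start + idx)
              else dataset_name_prefix ++ PySem.Int.toStr (writer_id_start + idx)) 3).toList
        ++ ("_" ++ PySem.Int.toStr f ++ "\", type = \"" ++ field_type ++ "\" },\n" : String).toList)
      = (fun f : Int => ("  { name = \"" ++ (dataset_name_prefix ++ PySem.Int.toStr (writer_id_start + idx))
            ++ "_" ++ PySem.Int.toStr f ++ "\", type = \"" ++ field_type ++ "\" }," : String).toList ++ ['\n']) := by
    funext f
    simp [String.toList_append, List.append_assoc]
  rw [hFG]
  simp [rnd, String.toList_append, List.append_assoc, List.flatMap_append, Function.comp_def]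
  simp only [List.flatMap_def, List.map_map]
  refine congrArg List.flatten (congrArg (fun F => List.map F (PySem.List.pyRange 1 (fields_per_dataset + 1))) (funext fun f => ?_))
  simp [String.toList_append, List.append_assoc]

-- ===== VERDICT (by name: the statement is the Claim_ definition above) =====
theorem generate_spec : Claim_equal_generate := by
  intro n publisher_name publisher_id wg_id_start writer_id_start interval_start_ms interval_step_ms fields_per_dataset wg_name_prefix dataset_name_prefix field_type _hdom
  unfold Spec_generate
  exact main_thm n publisher_name publisher_id wg_id_start writer_id_start interval_start_ms interval_step_ms fields_per_dataset wg_name_prefix dataset_name_prefix field_type
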